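-- pv_equiv track=rewrite | github.com/williamseddon/testingEnv | amazonReviewsAI.py | split_leading_json
-- ===== SOURCE A (Python) =====
-- from typing import Any, Callable, Dict, List, Optional, Sequence, Tuple
--
-- def split_leading_json(value: str) -> Tuple[Optional[str], str]:
--     if not value.startswith("{"):
--         return None, value
--
--     depth = 0
--     in_string = False
--     escaped = False
--     for idx, char in enumerate(value):
--         if in_string:
--             if escaped:
--                 escaped = False
--             elif char == "\\":
--                 escaped = True
--             elif char == '"':
--                 in_string = False
--         else:
--             if char == '"':
--                 in_string = True
--             elif char == "{":
--                 depth += 1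
--             elif char == "}":
--                 depth -= 1
--                 if depth == 0:
--                     return value[: idx + 1], value[idx + 1 :]
--     return None, value
-- ===== SOURCE B (Python) =====
-- def split_leading_json(value):
--     if not value.startswith("{"):
--         return None, value
--     n = len(value)
--     depth = 0
--     i = 0
--     while i < n:
--         c = value[i]
--         if c == '{':
--             depth += 1
--         elif c == '}':
--             depth -= 1
--             if depth == 0:
--                 return value[:i + 1], value[i + 1:]
--         elif c == '"':
--             i += 1
--             while i < n:
--                 if value[i] == '\\':
--                     i += 2
--                 elif value[i] == '"':
--                     break
--                 else:
--                     i += 1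
--         i += 1
--     return None, value
-- ===== Notes on version B (the rewrite author's own statement) =====
-- stated objective: alternative
-- what changed: Replaces A's single for loop with in_string/escaped boolean state flags by an index-driven while loop with a depth counter and a separate inner loop that consumes an entire string literal (skipping a char after each backslash) in one go; no state flags remain.
import Mathlib
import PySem

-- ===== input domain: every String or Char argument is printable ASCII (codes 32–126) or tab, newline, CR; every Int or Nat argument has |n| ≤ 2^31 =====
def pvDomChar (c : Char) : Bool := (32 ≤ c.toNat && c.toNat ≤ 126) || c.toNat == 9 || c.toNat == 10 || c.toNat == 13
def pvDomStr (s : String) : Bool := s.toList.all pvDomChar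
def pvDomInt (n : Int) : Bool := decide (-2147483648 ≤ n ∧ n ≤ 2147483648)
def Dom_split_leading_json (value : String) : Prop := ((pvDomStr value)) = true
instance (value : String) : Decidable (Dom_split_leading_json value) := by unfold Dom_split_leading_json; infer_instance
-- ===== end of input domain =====

-- B replaces A's in_string/escaped flag machine by an index-driven scan with an inner
-- string-literal-consuming loop (alternative decomposition, same linear cost).

-- ===== PORT A =====
-- A's for loop over enumerate(value) with state (depth, in_string, escaped);
-- idx is the index of the head of `rest` inside the full string `value`.
-- value[: idx+1] / value[idx+1 :] are exact as take/drop: 0 ≤ idx+1 ≤ len(value) there.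
def loopA (value : List Char) (rest : List Char) (idx : Nat) (depth : Int)
    (instr esc : Bool) : Option String × String :=
  match rest with
  | [] => (none, String.ofList value)
  | c :: tl =>
    if instr then
      if esc then loopA value tl (idx+1) depth true false
      else if c = '\\' then loopA value tl (idx+1) depth true true
      else if c = '"' then loopA value tl (idx+1) depth false esc
      else loopA value tl (idx+1) depth instr esc
    else
      if c = '"' then loopA value tl (idx+1) depth true esc
      else if c = '{' then loopA value tl (idx+1) (depth+1) instr esc
      else if c = '}' then
        if depth - 1 = 0 then
          (some (String.ofList (value.take (idx+1))), String.ofList (value.drop (idx+1)))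
        else loopA value tl (idx+1) (depth-1) instr esc
      else loopA value tl (idx+1) depth instr esc

def split_leading_json (value : String) : Option String × String :=
  if PySem.Str.startswith value "{" then
    loopA value.toList value.toList 0 0 false false
  else (none, value)

-- ===== PORT B =====
-- B's inner while loop: consume the chars of a string literal (after its opening quote);
-- returns (number of index steps taken, remaining chars starting at the closing quote,
-- or [] if the loop ran off the end).
def strB : List Char → Nat × List Char
  | [] => (0, [])
  | c :: tl =>
    if c = '\\' then
      match tl with
      | [] => (2, [])                       -- i += 2 ran past the end
      | _ :: tl2 => ((strB tl2).1 + 2, (strB tl2).2)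
    else if c = '"' then (0, c :: tl)       -- break at the closing quote
    else ((strB tl).1 + 1, (strB tl).2)

theorem strB_nil : strB [] = (0, []) := by rw [strB.eq_def]

theorem strB_esc_nil : strB ['\\'] = (2, []) := by rw [strB.eq_def]; rfl

theorem strB_esc (d : Char) (tl2 : List Char) :
    strB ('\\' :: d :: tl2) = ((strB tl2).1 + 2, (strB tl2).2) := by
  rw [strB.eq_def]; rfl

theorem strB_quote (tl : List Char) : strB ('"' :: tl) = (0, '"' :: tl) := by
  rw [strB.eq_def]; rfl

theorem strB_other (c : Char) (tl : List Char) (h : ¬ c = '\\') (h2 : ¬ c = '"') :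
    strB (c :: tl) = ((strB tl).1 + 1, (strB tl).2) := by
  rw [strB.eq_def]; simp [h, h2]

theorem strB_len : ∀ (l : List Char), (strB l).2.length ≤ l.length
  | [] => by simp [strB_nil]
  | c :: tl => by
    by_cases h : c = '\\'
    · subst h
      cases tl with
      | nil => simp [strB_esc_nil]
      | cons d tl2 =>
        have := strB_len tl2
        rw [strB_esc]
        simp only [List.length_cons]
        omega
    · by_cases h2 : c = '"'
      · subst h2; simp [strB_quote]
      · have := strB_len tl
        rw [strB_other c tl h h2]
        simp only [List.length_cons]
        omega

-- B's outer while loop; i is the index of the head of `rest` inside `value`.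
def loopB (value : List Char) (rest : List Char) (i : Nat) (depth : Int) :
    Option String × String :=
  match rest with
  | [] => (none, String.ofList value)
  | c :: tl =>
    if c = '{' then loopB value tl (i+1) (depth+1)
    else if c = '}' then
      if depth - 1 = 0 then
        (some (String.ofList (value.take (i+1))), String.ofList (value.drop (i+1)))
      else loopB value tl (i+1) (depth-1)
    else if c = '"' then
      match h2 : (strB tl).2 with
      | [] => (none, String.ofList value)   -- inner loop ran off the end; outer exits
      | _ :: r2 => loopB value r2 (i + 1 + (strB tl).1 + 1) depth
    else loopB value tl (i+1) depth
  termination_by rest.length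
  decreasing_by
  · simp
  · simp
  · have := strB_len tl; rw [h2] at this; simp only [List.length_cons] at this ⊢; omega
  · simp

def split_leading_json_alt (value : String) : Option String × String :=
  if PySem.Str.startswith value "{" then
    loopB value.toList value.toList 0 0
  else (none, value)

-- ===== PRECONDITION & SPEC =====
def Spec_split_leading_json (value : String) (out : Option String × String) : Prop := out = split_leading_json_alt value
instance (value : String) (out : Option String × String) : Decidable (Spec_split_leading_json value out) := by unfold Spec_split_leading_json; infer_instance

-- ===== CLAIM (what is proved, stated in full; the proofs are below) =====
def Claim_equal_split_leading_json : Prop := ∀ (value : String), Dom_split_leading_json value → Spec_split_leading_json value (split_leading_json value)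

-- ===== LEMMAS AND PROOFS =====

-- small-step equations for loopA
theorem loopA_nil (value : List Char) (idx : Nat) (depth : Int) (instr esc : Bool) :
    loopA value [] idx depth instr esc = (none, String.ofList value) := by
  rw [loopA]

theorem loopA_esc (value : List Char) (c : Char) (tl : List Char) (idx : Nat) (depth : Int) :
    loopA value (c :: tl) idx depth true true = loopA value tl (idx+1) depth true false := by
  rw [loopA]; rfl

theorem loopA_bs (value : List Char) (tl : List Char) (idx : Nat) (depth : Int) :
    loopA value ('\\' :: tl) idx depth true false = loopA value tl (idx+1) depth true true := by
  rw [loopA]; rfl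

theorem loopA_endq (value : List Char) (tl : List Char) (idx : Nat) (depth : Int) :
    loopA value ('"' :: tl) idx depth true false = loopA value tl (idx+1) depth false false := by
  rw [loopA]; rfl

theorem loopA_instr_other (value : List Char) (c : Char) (tl : List Char) (idx : Nat)
    (depth : Int) (h : ¬ c = '\\') (h2 : ¬ c = '"') :
    loopA value (c :: tl) idx depth true false = loopA value tl (idx+1) depth true false := by
  rw [loopA]; simp [h, h2]

theorem loopA_q (value : List Char) (tl : List Char) (idx : Nat) (depth : Int) :
    loopA value ('"' :: tl) idx depth false false = loopA value tl (idx+1) depth true false := by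
  rw [loopA]; rfl

theorem loopA_ob (value : List Char) (tl : List Char) (idx : Nat) (depth : Int) :
    loopA value ('{' :: tl) idx depth false false = loopA value tl (idx+1) (depth+1) false false := by
  rw [loopA]; rfl

theorem loopA_cb (value : List Char) (tl : List Char) (idx : Nat) (depth : Int) :
    loopA value ('}' :: tl) idx depth false false =
      (if depth - 1 = 0 then
        (some (String.ofList (value.take (idx+1))), String.ofList (value.drop (idx+1)))
      else loopA value tl (idx+1) (depth-1) false false) := by
  rw [loopA]; rfl

theorem loopA_out_other (value : List Char) (c : Char) (tl : List Char) (idx : Nat)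
    (depth : Int) (h : ¬ c = '"') (h2 : ¬ c = '{') (h3 : ¬ c = '}') :
    loopA value (c :: tl) idx depth false false = loopA value tl (idx+1) depth false false := by
  rw [loopA]; simp [h, h2, h3]

-- Inside a string literal, A's flag machine lands exactly where B's inner loop does.
theorem loopA_instr (value : List Char) :
    ∀ (rest : List Char) (idx : Nat) (depth : Int),
    loopA value rest idx depth true false =
      (match (strB rest).2 with
       | [] => (none, String.ofList value)
       | _ :: r2 => loopA value r2 (idx + (strB rest).1 + 1) depth false false)
  | [], idx, depth => by simp [strB_nil, loopA_nil]
  | c :: tl, idx, depth => by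
    by_cases h : c = '\\'
    · subst h
      cases tl with
      | nil => simp [strB_esc_nil, loopA_bs, loopA_esc, loopA_nil]
      | cons d tl2 =>
        rw [loopA_bs, loopA_esc, strB_esc,
          show idx + 1 + 1 = idx + 2 from by omega,
          loopA_instr value tl2 (idx+2) depth]
        cases hr : (strB tl2).2 with
        | nil => simp [hr]
        | cons q r2 =>
          simp only [hr]
          rw [show idx + 2 + (strB tl2).1 + 1 = idx + ((strB tl2).1 + 2) + 1 from by omega]
    · by_cases h2 : c = '"'
      · subst h2
        rw [loopA_endq, strB_quote]
        simp
      · rw [loopA_instr_other value c tl idx depth h h2, strB_other c tl h h2,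
          loopA_instr value tl (idx+1) depth]
        cases hr : (strB tl).2 with
        | nil => simp [hr]
        | cons q r2 =>
          simp only [hr]
          rw [show idx + 1 + (strB tl).1 + 1 = idx + ((strB tl).1 + 1) + 1 from by omega]
  termination_by rest _ _ => rest.length
  decreasing_by
  · simp only [List.length_cons]; omega
  · simp only [List.length_cons]; omega

-- A's loop equals B's loop from any position outside a string literal.
theorem loopA_eq_loopB (value : List Char) :
    ∀ (rest : List Char) (i : Nat) (depth : Int),
    loopA value rest i depth false false = loopB value rest i depth
  | [], i, depth => by rw [loopA_nil, loopB]
  | c :: tl, i, depth => by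
    by_cases hq : c = '"'
    · subst hq
      rw [loopA_q, loopB, loopA_instr value tl (i+1) depth]
      simp only [reduceCtorEq, reduceIte]
      cases hr : (strB tl).2 with
      | nil => simp
      | cons q r2 =>
        simp only []
        rw [show i + 1 + (strB tl).1 + 1 = i + 1 + (strB tl).1 + 1 from rfl]
        exact loopA_eq_loopB value r2 (i + 1 + (strB tl).1 + 1) depth
    · by_cases hob : c = '{'
      · subst hob
        rw [loopA_ob, loopB, loopA_eq_loopB value tl (i+1) (depth+1)]
        simp
      · by_cases hcb : c = '}'
        · subst hcb
          rw [loopA_cb, loopB]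
          by_cases hd : depth - 1 = 0
          · simp [hd]
          · simp only [reduceCtorEq, reduceIte, if_neg hd, if_pos rfl]
            exact loopA_eq_loopB value tl (i+1) (depth-1)
        · rw [loopA_out_other value c tl i depth hq hob hcb, loopB,
            loopA_eq_loopB value tl (i+1) depth]
          simp [hq, hob, hcb]
  termination_by rest _ _ => rest.length
  decreasing_by
  · have := strB_len tl; rw [hr] at this
    simp only [List.length_cons] at this ⊢; omega
  all_goals (simp only [List.length_cons]; omega)

-- ===== VERDICT (by name: the statement is the Claim_ definition above) =====
theorem split_leading_json_spec : Claim_equal_split_leading_json := by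
  intro value _
  unfold Spec_split_leading_json split_leading_json split_leading_json_alt
  split
  · exact loopA_eq_loopB _ _ _ _
  · rfl
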